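-- pv_equiv track=rewrite | github.com/bshepp/terravector | src/features/texture.py | get_texture_labels
-- ===== SOURCE A (Python) =====
-- from typing import Tuple, Dict, Callable, Any, List
--
-- TEXTURE_FEATURES: Dict[str, Callable] = {}
--
-- def get_texture_labels(features: List[str] = None) -> List[str]:
--     """Get labels for each dimension."""
--     if features is None:
--         features = list(TEXTURE_FEATURES.keys())
--
--     labels = []
--     for feat in features:
--         if feat == 'glcm':
--             for prop in ['contrast', 'dissimilarity', 'homogeneity', 'energy', 'correlation', 'ASM']:
--                 labels.append(f"glcm_{prop}")
--         elif feat == 'lbp':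
--             for i in range(6):
--                 labels.append(f"lbp_bin{i}")
--             labels.extend(['lbp_mean', 'lbp_std', 'lbp_entropy', 'lbp_uniformity'])
--     return labels
-- ===== SOURCE B (Python) =====
-- from typing import Tuple, Dict, Callable, Any, List
--
-- TEXTURE_FEATURES: Dict[str, Callable] = {}
--
-- _LABEL_TABLE: Dict[str, List[str]] = {
--     'glcm': ['glcm_contrast', 'glcm_dissimilarity', 'glcm_homogeneity',
--              'glcm_energy', 'glcm_correlation', 'glcm_ASM'],
--     'lbp': ['lbp_bin0', 'lbp_bin1', 'lbp_bin2', 'lbp_bin3', 'lbp_bin4',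
--             'lbp_bin5', 'lbp_mean', 'lbp_std', 'lbp_entropy', 'lbp_uniformity'],
-- }
--
-- def get_texture_labels(features: List[str] = None) -> List[str]:
--     """Get labels for each dimension."""
--     if features is None:
--         features = list(TEXTURE_FEATURES.keys())
--     labels: List[str] = []
--     for feat in features:
--         labels.extend(_LABEL_TABLE.get(feat, []))
--     return labels
-- ===== Notes on version B (the rewrite author's own statement) =====
-- stated objective: idiomatic
-- what changed: Replaces the if/elif chain with nested label-building loops and f-strings by a precomputed dispatch table of fully materialized label lists, built with one flat extend pass per feature.
import Mathlib
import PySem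

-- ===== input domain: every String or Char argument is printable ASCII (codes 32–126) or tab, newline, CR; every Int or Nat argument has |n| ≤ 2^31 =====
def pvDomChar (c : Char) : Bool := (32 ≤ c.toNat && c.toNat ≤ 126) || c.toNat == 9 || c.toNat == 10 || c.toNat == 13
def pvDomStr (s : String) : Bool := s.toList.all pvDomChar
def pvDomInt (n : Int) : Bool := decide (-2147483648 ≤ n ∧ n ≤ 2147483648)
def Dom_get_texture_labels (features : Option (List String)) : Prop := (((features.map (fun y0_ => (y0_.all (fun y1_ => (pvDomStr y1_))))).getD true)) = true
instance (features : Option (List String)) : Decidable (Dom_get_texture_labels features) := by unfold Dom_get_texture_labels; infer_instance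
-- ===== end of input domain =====

-- B replaces A's if/elif chain with nested loops by a precomputed label table and one flat extend pass (idiomatic; same cost).

-- ===== PORT A =====
-- TEXTURE_FEATURES is the empty dict in the module, so list(TEXTURE_FEATURES.keys()) = []
def pvGlcmProps : List String := ["contrast", "dissimilarity", "homogeneity", "energy", "correlation", "ASM"]

def get_texture_labels (features : Option (List String)) : List String :=
  let feats := features.getD []
  feats.foldl (fun labels feat =>
    if feat = "glcm" then
      pvGlcmProps.foldl (fun ls p => ls ++ ["glcm_" ++ p]) labels
    else if feat = "lbp" then
      ((PySem.List.pyRange 0 6 1).foldl (fun ls i => ls ++ ["lbp_bin" ++ PySem.Int.toStr i]) labels)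
        ++ ["lbp_mean", "lbp_std", "lbp_entropy", "lbp_uniformity"]
    else labels) []

-- ===== PORT B =====
def pvLabelTable : PySem.Dict String (List String) := PySem.Dict.ofList
  [("glcm", ["glcm_contrast", "glcm_dissimilarity", "glcm_homogeneity",
             "glcm_energy", "glcm_correlation", "glcm_ASM"]),
   ("lbp", ["lbp_bin0", "lbp_bin1", "lbp_bin2", "lbp_bin3", "lbp_bin4",
            "lbp_bin5", "lbp_mean", "lbp_std", "lbp_entropy", "lbp_uniformity"])]

def get_texture_labels_alt (features : Option (List String)) : List String :=
  let feats := features.getD []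
  feats.foldl (fun labels feat => labels ++ PySem.Dict.getD pvLabelTable feat []) []

-- ===== PRECONDITION & SPEC =====
def Spec_get_texture_labels (features : Option (List String)) (out : List String) : Prop := out = get_texture_labels_alt features
instance (features : Option (List String)) (out : List String) : Decidable (Spec_get_texture_labels features out) := by unfold Spec_get_texture_labels; infer_instance

-- ===== CLAIM (what is proved, stated in full; the proofs are below) =====
def Claim_equal_get_texture_labels : Prop := ∀ (features : Option (List String)), Dom_get_texture_labels features → Spec_get_texture_labels features (get_texture_labels features)

-- ===== LEMMAS AND PROOFS =====
theorem pv_step_eq (labels : List String) (feat : String) :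
    (if feat = "glcm" then
      pvGlcmProps.foldl (fun ls p => ls ++ ["glcm_" ++ p]) labels
    else if feat = "lbp" then
      ((PySem.List.pyRange 0 6 1).foldl (fun ls i => ls ++ ["lbp_bin" ++ PySem.Int.toStr i]) labels)
        ++ ["lbp_mean", "lbp_std", "lbp_entropy", "lbp_uniformity"]
    else labels) = labels ++ PySem.Dict.getD pvLabelTable feat [] := by
  by_cases hg : feat = "glcm"
  · subst hg
    simp only [if_pos rfl, pvGlcmProps, pvLabelTable, List.foldl, PySem.Dict.ofList,
      PySem.Dict.getD_eq_get?_getD, PySem.Dict.get?_mk_cons, List.append_assoc]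
    norm_num
    congr 1
  · by_cases hl : feat = "lbp"
    · subst hl
      simp only [if_neg (by decide : ¬ ("lbp" : String) = "glcm"), if_pos rfl, pvLabelTable,
        List.foldl, PySem.Dict.ofList, PySem.Dict.getD_eq_get?_getD, PySem.Dict.get?_mk_cons,
        List.append_assoc, PySem.List.pyRange]
      norm_num
      congr 1
    · have h1 : ("glcm" == feat) = false := by simpa using fun h => hg h.symm
      have h2 : ("lbp" == feat) = false := by simpa using fun h => hl h.symm
      have hitems : pvLabelTable.items =
          [("glcm", ["glcm_contrast", "glcm_dissimilarity", "glcm_homogeneity",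
                     "glcm_energy", "glcm_correlation", "glcm_ASM"]),
           ("lbp", ["lbp_bin0", "lbp_bin1", "lbp_bin2", "lbp_bin3", "lbp_bin4",
                    "lbp_bin5", "lbp_mean", "lbp_std", "lbp_entropy", "lbp_uniformity"])] := by
        decide
      simp [hg, hl, PySem.Dict.getD_eq_get?_getD, PySem.Dict.get?, hitems, List.find?, h1, h2]

theorem pv_fold_eq (feats : List String) (labels : List String) :
    feats.foldl (fun labels feat =>
      if feat = "glcm" then
        pvGlcmProps.foldl (fun ls p => ls ++ ["glcm_" ++ p]) labels
      else if feat = "lbp" then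
        ((PySem.List.pyRange 0 6 1).foldl (fun ls i => ls ++ ["lbp_bin" ++ PySem.Int.toStr i]) labels)
          ++ ["lbp_mean", "lbp_std", "lbp_entropy", "lbp_uniformity"]
      else labels) labels
    = feats.foldl (fun labels feat => labels ++ PySem.Dict.getD pvLabelTable feat []) labels := by
  induction feats generalizing labels with
  | nil => rfl
  | cons f fs ih => simp only [List.foldl_cons, pv_step_eq, ih]

-- ===== VERDICT (by name: the statement is the Claim_ definition above) =====
theorem get_texture_labels_spec : Claim_equal_get_texture_labels := by
  intro features _
  unfold Spec_get_texture_labels get_texture_labels get_texture_labels_alt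
  exact pv_fold_eq _ _
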